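-- pv_equiv track=rewrite | github.com/ahnafshahriyarchow/data-algorithm-tasks | task_2.py | longest_special_substring
-- ===== SOURCE A (Python) =====
-- def is_special(substring):
--     #stores all lowercase and uppercase letters found in the substring
--     lower_alphabetset=set()
--     upper_alphabetset=set()
--
--     #iterate through the substring to separate lowercase and uppercase letter
--     for char in substring:
--         if char.islower():
--             lower_alphabetset.add(char)
--         elif char.isupper():
--             upper_alphabetset.add(char)
--     #checking if each lowercase letter has its uppercase counterpart and vice versa
--     return all(char.upper() in upper_alphabetset for char in lower_alphabetset) and all(char.lower() in lower_alphabetset for char in upper_alphabetset)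
--
-- def longest_special_substring(s):
--     n=len(s)
--     longest_substring=""  #variable declared to store the longest special substring
--
--     #generating all possible substrings using two nested loops
--     for i in range(n):
--         for j in range(i+1,n+1):
--             substring=s[i:j]
--             #if the substring is special and longer than the previously stored one then update it
--             if is_special(substring) and len(substring)> len(longest_substring):
--                 longest_substring=substring
--
--     return longest_substring
-- ===== SOURCE B (Python) =====
-- def longest_special_substring(s):
--     n = len(s)
--     best_start, best_len = 0, 0
--     for i in range(n):
--         lower, upper = set(), set()
--         for j in range(i, n):
--             c = s[j]
--             if c.islower():
--                 lower.add(c)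
--             elif c.isupper():
--                 upper.add(c)
--             if (j - i + 1 > best_len
--                     and all(x.upper() in upper for x in lower)
--                     and all(x.lower() in lower for x in upper)):
--                 best_start, best_len = i, j - i + 1
--     return s[best_start:best_start + best_len]
-- ===== Notes on version B (the rewrite author's own statement) =====
-- stated objective: faster
-- what changed: A tests every substring with is_special, rebuilding its two letter sets from scratch for each of the O(n^2) substrings; B keeps the lowercase/uppercase letter sets incrementally while extending the substring from each start index, so each character is absorbed once per start and the pairedness check runs on the maintained sets.
import Mathlib
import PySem

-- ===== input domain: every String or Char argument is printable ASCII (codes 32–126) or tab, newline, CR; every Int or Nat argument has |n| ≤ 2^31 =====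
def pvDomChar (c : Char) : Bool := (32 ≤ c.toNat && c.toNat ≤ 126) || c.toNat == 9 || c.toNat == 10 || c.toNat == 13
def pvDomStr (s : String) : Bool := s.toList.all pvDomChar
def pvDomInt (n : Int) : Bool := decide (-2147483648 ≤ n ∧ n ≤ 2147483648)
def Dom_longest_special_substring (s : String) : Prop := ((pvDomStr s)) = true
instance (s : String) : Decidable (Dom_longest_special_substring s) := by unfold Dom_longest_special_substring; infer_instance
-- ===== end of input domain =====

-- B replaces A's is_special test recomputed from scratch on every substring by letter
-- sets maintained incrementally along each start index (one inner pass per start).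

-- ===== PORT A =====
-- the set-building loop of Python's is_special (if islower / elif isupper)
def specStep (p : PySem.Set Char × PySem.Set Char) (c : Char) :
    PySem.Set Char × PySem.Set Char :=
  if PySem.Chars.islower c then (PySem.Set.add p.1 c, p.2)
  else if PySem.Chars.isupper c then (p.1, PySem.Set.add p.2 c)
  else p

def is_special (sub : List Char) : Bool :=
  let p := sub.foldl specStep (PySem.Set.empty, PySem.Set.empty)
  p.1.all (fun ch => PySem.Set.contains p.2 (PySem.Chars.upperChar ch)) &&
  p.2.all (fun ch => PySem.Set.contains p.1 (PySem.Chars.lowerChar ch))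

def longest_special_substring (s : String) : String :=
  let cs := s.toList
  let n : Int := PySem.Str.len s
  let best := (PySem.List.pyRange 0 n 1).foldl (fun best i =>
    (PySem.List.pyRange (i+1) (n+1) 1).foldl (fun best j =>
      let sub := PySem.List.slice cs (some i) (some j)
      if is_special sub && decide (best.length < sub.length) then sub else best)
      best) ([] : List Char)
  String.ofList best

-- ===== PORT B =====
-- per-character update of the incrementally maintained letter sets
def altStep (p : PySem.Set Char × PySem.Set Char) (c : Char) :
    PySem.Set Char × PySem.Set Char :=
  if PySem.Chars.islower c then (PySem.Set.add p.1 c, p.2)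
  else if PySem.Chars.isupper c then (p.1, PySem.Set.add p.2 c)
  else p

-- the two all(...) checks on the maintained sets
def altPaired (lo up : PySem.Set Char) : Bool :=
  lo.all (fun ch => PySem.Set.contains up (PySem.Chars.upperChar ch)) &&
  up.all (fun ch => PySem.Set.contains lo (PySem.Chars.lowerChar ch))

def longest_special_substring_alt (s : String) : String :=
  let cs := s.toList
  let n : Int := PySem.Str.len s
  let best := (PySem.List.pyRange 0 n 1).foldl (fun (best : Int × Int) i =>
    ((PySem.List.pyRange i n 1).foldl
      (fun (st : (PySem.Set Char × PySem.Set Char) × Int × Int) j =>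
        let c := PySem.List.pyGetD cs j ' '
        let p := altStep st.1 c
        if decide (st.2.2 < j - i + 1) && altPaired p.1 p.2
        then (p, (i, j - i + 1)) else (p, st.2))
      ((PySem.Set.empty, PySem.Set.empty), best)).2) ((0 : Int), (0 : Int))
  String.ofList (PySem.List.slice cs (some best.1) (some (best.1 + best.2)))

-- ===== PRECONDITION & SPEC =====
def Spec_longest_special_substring (s : String) (out : String) : Prop := out = longest_special_substring_alt s
instance (s : String) (out : String) : Decidable (Spec_longest_special_substring s out) := by unfold Spec_longest_special_substring; infer_instance

-- ===== CLAIM (what is proved, stated in full; the proofs are below) =====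
def Claim_equal_longest_special_substring : Prop := ∀ (s : String), Dom_longest_special_substring s → Spec_longest_special_substring s (longest_special_substring s)

-- ===== LEMMAS AND PROOFS =====

-- the two per-char steps and the two pairedness checks are literally the same code
theorem altStep_eq_specStep : altStep = specStep := rfl

theorem is_special_eq_altPaired (sub : List Char) :
    is_special sub =
      altPaired (sub.foldl specStep (PySem.Set.empty, PySem.Set.empty)).1
                (sub.foldl specStep (PySem.Set.empty, PySem.Set.empty)).2 := rfl

theorem pv_slice_len (cs : List Char) (i j : Nat) (hj : j ≤ cs.length) :
    (PySem.List.slice cs (some (i:Int)) (some (j:Int))).length = j - i := by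
  rw [PySem.List.slice_natCast]
  simp [List.length_take, List.length_drop]
  omega

theorem pv_slice_snoc (cs : List Char) (i m : Nat) (him : i ≤ m) (hm : m < cs.length) :
    PySem.List.slice cs (some (i:Int)) (some ((m:Int)+1)) =
      PySem.List.slice cs (some (i:Int)) (some (m:Int)) ++ [cs[m]] := by
  have h1 : ((m:Int)+1) = (((m+1 : Nat)):Int) := by push_cast; ring
  rw [h1, PySem.List.slice_natCast, PySem.List.slice_natCast]
  have h2 : m + 1 - i = (m - i) + 1 := by omega
  rw [h2, List.take_add_one]
  congr 1
  have : (cs.drop i)[m - i]? = some cs[m] := by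
    rw [List.getElem?_drop]
    have : i + (m - i) = m := by omega
    rw [this]
    exact List.getElem?_eq_getElem hm
  simp [this]

def pvRel (cs : List Char) (b : List Char) (q : Int × Int) : Prop :=
  ∃ bi bl : Nat, q = ((bi:Int), (bl:Int)) ∧ bi + bl ≤ cs.length ∧
    b = PySem.List.slice cs (some (bi:Int)) (some ((bi:Int) + (bl:Int))) ∧ b.length = bl

theorem pv_inner (cs : List Char) (i : Nat) (_hi : i < cs.length) :
    ∀ (k : Nat) (m : Nat), cs.length ≤ m + k → i ≤ m → m ≤ cs.length →
    ∀ (b : List Char) (q : Int × Int), pvRel cs b q →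
    pvRel cs
      ((PySem.List.pyRange ((m:Int)+1) ((cs.length:Int)+1) 1).foldl (fun best j =>
        let sub := PySem.List.slice cs (some (i:Int)) (some j)
        if is_special sub && decide (best.length < sub.length) then sub else best) b)
      (((PySem.List.pyRange (m:Int) (cs.length:Int) 1).foldl
        (fun (st : (PySem.Set Char × PySem.Set Char) × Int × Int) j =>
          let c := PySem.List.pyGetD cs j ' '
          let p := altStep st.1 c
          if decide (st.2.2 < j - (i:Int) + 1) && altPaired p.1 p.2
          then (p, ((i:Int), j - (i:Int) + 1)) else (p, st.2))
        (((PySem.List.slice cs (some (i:Int)) (some (m:Int))).foldl specStep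
            (PySem.Set.empty, PySem.Set.empty)), q)).2) := by
  intro k
  induction k with
  | zero =>
    intro m hk him hm b q hrel
    rw [PySem.List.pyRange_one_eq_nil (by omega), PySem.List.pyRange_one_eq_nil (by omega)]
    exact hrel
  | succ k ih =>
    intro m hk him hm b q hrel
    by_cases hme : m = cs.length
    · subst hme
      rw [PySem.List.pyRange_one_eq_nil (by omega), PySem.List.pyRange_one_eq_nil (by omega)]
      exact hrel
    · have hmlt : m < cs.length := by omega
      rw [PySem.List.pyRange_one_cons (show (m:Int) < (cs.length:Int) by exact_mod_cast hmlt),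
          PySem.List.pyRange_one_cons (show (m:Int)+1 < (cs.length:Int)+1 by
            have : (m:Int) < (cs.length:Int) := by exact_mod_cast hmlt
            omega)]
      simp only [List.foldl_cons]
      obtain ⟨bi, bl, hq, hble, hbs, hbl⟩ := hrel
      have hcast : ((m:Int)+1) = (((m+1:Nat)):Int) := by push_cast; ring
      rw [hcast]
      have hgc : PySem.List.pyGetD cs ((m:Int)) ' ' = cs[m] := by
        rw [PySem.List.pyGetD_natCast]
        simp [List.getD, List.getElem?_eq_getElem hmlt]
      have hsnoc : PySem.List.slice cs (some (i:Int)) (some (((m+1:Nat)):Int)) =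
          PySem.List.slice cs (some (i:Int)) (some ((m:Int))) ++ [cs[m]] := by
        rw [← hcast]; exact pv_slice_snoc cs i m him hmlt
      have hfold : (PySem.List.slice cs (some (i:Int)) (some (((m+1:Nat)):Int))).foldl specStep
            (PySem.Set.empty, PySem.Set.empty) =
          specStep ((PySem.List.slice cs (some (i:Int)) (some ((m:Int)))).foldl specStep
            (PySem.Set.empty, PySem.Set.empty)) cs[m] := by
        rw [hsnoc, List.foldl_append]; rfl
      have hlen : (PySem.List.slice cs (some (i:Int)) (some (((m+1:Nat)):Int))).length = m+1-i :=
        pv_slice_len cs i (m+1) (by omega)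
      have hdec : (decide (((bl:Nat):Int) < (m:Int) - (i:Int) + 1)) = decide (bl < m+1-i) := by
        simp only [decide_eq_decide]; omega
      simp only [hgc, altStep_eq_specStep, ← hfold, is_special_eq_altPaired, hq, hbl, hlen, hdec,
        Bool.and_comm]
      split
      · have hrelnew : pvRel cs (PySem.List.slice cs (some (i:Int)) (some (((m+1:Nat)):Int)))
            (((i:Nat):Int), (m:Int) - (i:Int) + 1) := by
          refine ⟨i, m+1-i, ?_, by omega, ?_, hlen⟩
          · simp only [Prod.mk.injEq]
            exact ⟨trivial, by omega⟩
          · have h : ((i:Int) + ((m+1-i : Nat) : Int)) = (((m+1:Nat)):Int) := by omega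
            rw [h]
        have ih' := ih (m+1) (by omega) (by omega) (by omega)
          (PySem.List.slice cs (some (i:Int)) (some (((m+1:Nat)):Int)))
          (((i:Nat):Int), (m:Int) - (i:Int) + 1) hrelnew
        simp only [is_special_eq_altPaired, altStep_eq_specStep, Bool.and_comm] at ih'
        exact ih'
      · have ih' := ih (m+1) (by omega) (by omega) (by omega) b (((bi:Nat):Int), ((bl:Nat):Int))
          ⟨bi, bl, rfl, hble, hbs, hbl⟩
        simp only [is_special_eq_altPaired, altStep_eq_specStep, Bool.and_comm] at ih'
        exact ih'

theorem pv_outer (cs : List Char) :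
    ∀ (k : Nat) (m : Nat), cs.length ≤ m + k → m ≤ cs.length →
    ∀ (b : List Char) (q : Int × Int), pvRel cs b q →
    pvRel cs
      ((PySem.List.pyRange (m:Int) (cs.length:Int) 1).foldl (fun best i =>
        (PySem.List.pyRange (i+1) ((cs.length:Int)+1) 1).foldl (fun best j =>
          let sub := PySem.List.slice cs (some i) (some j)
          if is_special sub && decide (best.length < sub.length) then sub else best)
          best) b)
      ((PySem.List.pyRange (m:Int) (cs.length:Int) 1).foldl (fun (best : Int × Int) i =>
        ((PySem.List.pyRange i (cs.length:Int) 1).foldl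
          (fun (st : (PySem.Set Char × PySem.Set Char) × Int × Int) j =>
            let c := PySem.List.pyGetD cs j ' '
            let p := altStep st.1 c
            if decide (st.2.2 < j - i + 1) && altPaired p.1 p.2
            then (p, (i, j - i + 1)) else (p, st.2))
          ((PySem.Set.empty, PySem.Set.empty), best)).2) q) := by
  intro k
  induction k with
  | zero =>
    intro m hk hm b q hrel
    rw [PySem.List.pyRange_one_eq_nil (by omega)]
    exact hrel
  | succ k ih =>
    intro m hk hm b q hrel
    by_cases hme : m = cs.length
    · subst hme
      rw [PySem.List.pyRange_one_eq_nil (by omega)]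
      exact hrel
    · have hmlt : m < cs.length := by omega
      rw [PySem.List.pyRange_one_cons (show (m:Int) < (cs.length:Int) by exact_mod_cast hmlt)]
      simp only [List.foldl_cons]
      have hcast : ((m:Int)+1) = (((m+1:Nat)):Int) := by push_cast; ring
      have hslice : PySem.List.slice cs (some (m:Int)) (some (m:Int)) = [] := by
        rw [PySem.List.slice_natCast]; simp
      have hstep := pv_inner cs m hmlt cs.length m (by omega) (le_refl m) hm b q hrel
      rw [hslice] at hstep
      simp only [List.foldl_nil] at hstep
      rw [hcast] at hstep ⊢
      exact ih (m+1) (by omega) (by omega) _ _ hstep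

-- ===== VERDICT (by name: the statement is the Claim_ definition above) =====
theorem longest_special_substring_spec : Claim_equal_longest_special_substring := by
  unfold Claim_equal_longest_special_substring
  intro s _
  unfold Spec_longest_special_substring
  unfold longest_special_substring longest_special_substring_alt
  have hn : PySem.Str.len s = ((s.toList.length : Nat) : Int) := by
    simp [pysem]
  rw [hn]
  have hinit : pvRel s.toList [] ((0:Int), (0:Int)) := by
    refine ⟨0, 0, by norm_num, by omega, ?_, rfl⟩
    have h00 : ((0:Nat):Int) + ((0:Nat):Int) = (((0:Nat)):Int) := by norm_num
    rw [h00, PySem.List.slice_natCast]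
    simp
  have hout := pv_outer s.toList s.toList.length 0 (by omega) (by omega) [] ((0:Int),(0:Int)) hinit
  simp only [Nat.cast_zero] at hout
  obtain ⟨bi, bl, hq, hble, hbs, hbl⟩ := hout
  simp only [hq, hbs]
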